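-- pv_equiv track=rewrite | github.com/Xs1KVerOA/ZhuWei | backend/app/db.py | _sqlite_placeholders_to_psycopg
-- ===== SOURCE A (Python) =====
-- def _sqlite_placeholders_to_psycopg(sql: str) -> str:
--     out: list[str] = []
--     in_single = False
--     in_double = False
--     index = 0
--     while index < len(sql):
--         char = sql[index]
--         next_char = sql[index + 1] if index + 1 < len(sql) else ""
--         if char == "'" and not in_double:
--             out.append(char)
--             if in_single and next_char == "'":
--                 out.append(next_char)
--                 index += 2
--                 continue
--             in_single = not in_single
--         elif char == '"' and not in_single:
--             out.append(char)
--             if in_double and next_char == '"':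
--                 out.append(next_char)
--                 index += 2
--                 continue
--             in_double = not in_double
--         elif char == "?" and not in_single and not in_double:
--             out.append("%s")
--         elif char == "%":
--             out.append("%%")
--         else:
--             out.append(char)
--         index += 1
--     return "".join(out)
-- ===== SOURCE B (Python) =====
-- def _copy_literal(sql, i, out):
--     # copy a whole quoted literal (doubled-quote escapes, tolerant of an
--     # unterminated literal), doubling every '%' inside; return next index
--     q = sql[i]
--     out.append(q)
--     i += 1
--     n = len(sql)
--     while i < n:
--         c = sql[i]
--         if c == q:
--             if i + 1 < n and sql[i + 1] == q:
--                 out.append(q + q)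
--                 i += 2
--                 continue
--             out.append(q)
--             return i + 1
--         if c == '%':
--             out.append('%%')
--         else:
--             out.append(c)
--         i += 1
--     return i
--
--
-- def _sqlite_placeholders_to_psycopg(sql: str) -> str:
--     out: list[str] = []
--     i, n = 0, len(sql)
--     while i < n:
--         c = sql[i]
--         if c == "'" or c == '"':
--             i = _copy_literal(sql, i, out)
--         elif c == '?':
--             out.append('%s')
--             i += 1
--         elif c == '%':
--             out.append('%%')
--             i += 1
--         else:
--             out.append(c)
--             i += 1
--     return ''.join(out)
-- ===== Notes on version B (the rewrite author's own statement) =====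
-- stated objective: alternative
-- what changed: Replaced the char-by-char two-boolean quote-state machine by a token-level scanner that consumes each quoted literal as a unit with a dedicated helper (handling doubled-quote escapes and unterminated literals), so the main loop carries no quote-state flags.
import Mathlib
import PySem

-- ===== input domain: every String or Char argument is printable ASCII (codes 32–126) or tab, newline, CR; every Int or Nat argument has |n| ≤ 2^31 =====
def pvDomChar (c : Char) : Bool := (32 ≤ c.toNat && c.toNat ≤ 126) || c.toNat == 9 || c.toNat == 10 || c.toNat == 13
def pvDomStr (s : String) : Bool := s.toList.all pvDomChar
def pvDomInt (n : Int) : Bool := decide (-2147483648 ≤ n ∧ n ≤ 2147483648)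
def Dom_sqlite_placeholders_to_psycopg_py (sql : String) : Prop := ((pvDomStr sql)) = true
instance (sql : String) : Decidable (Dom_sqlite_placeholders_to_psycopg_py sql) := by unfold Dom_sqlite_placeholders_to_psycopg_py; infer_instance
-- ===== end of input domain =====

-- B replaces A's char-by-char two-flag quote-state machine by a token-level
-- scanner that consumes each quoted literal as a unit (alternative, same cost).


-- ===== PORT A =====
-- A's while-loop over the index with flags in_single/in_double, as a
-- recursion over the remaining characters with the same two booleans;
-- rest.head? is A's next_char lookahead (= "" at the end of the string).
def pvALoop (ins ind : Bool) (l : List Char) : List Char :=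
  match l with
  | [] => []
  | c :: rest =>
    if c = '\'' ∧ ind = false then
      if ins = true ∧ rest.head? = some '\'' then
        '\'' :: '\'' :: pvALoop ins ind rest.tail
      else '\'' :: pvALoop (!ins) ind rest
    else if c = '"' ∧ ins = false then
      if ind = true ∧ rest.head? = some '"' then
        '"' :: '"' :: pvALoop ins ind rest.tail
      else '"' :: pvALoop ins (!ind) rest
    else if c = '?' ∧ ins = false ∧ ind = false then
      '%' :: 's' :: pvALoop ins ind rest
    else if c = '%' then
      '%' :: '%' :: pvALoop ins ind rest
    else
      c :: pvALoop ins ind rest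
termination_by l.length
decreasing_by all_goals (simp [List.length_tail]; try omega)

def sqlite_placeholders_to_psycopg_py (sql : String) : String :=
  String.mk (pvALoop false false sql.toList)

-- ===== PORT B =====
-- B's token scanner: pvCopyLit copies one quoted literal opened by q
-- (doubled-quote escape, '%' doubled inside, tolerant of a missing close),
-- returning to pvScan after the closing quote; pvScan is the main loop,
-- which has no quote-state flags.
mutual
def pvCopyLit (q : Char) (l : List Char) : List Char :=
  match l with
  | [] => []
  | c :: rest =>
    if c = q then
      match rest with
      | c2 :: rest2 =>
        if c2 = q then q :: q :: pvCopyLit q rest2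
        else q :: pvScan (c2 :: rest2)
      | [] => [q]   -- closing quote at end of input: the outer loop is done
    else if c = '%' then '%' :: '%' :: pvCopyLit q rest
    else c :: pvCopyLit q rest
termination_by l.length

def pvScan (l : List Char) : List Char :=
  match l with
  | [] => []
  | c :: rest =>
    if c = '\'' ∨ c = '"' then c :: pvCopyLit c rest
    else if c = '?' then '%' :: 's' :: pvScan rest
    else if c = '%' then '%' :: '%' :: pvScan rest
    else c :: pvScan rest
termination_by l.length
end

def sqlite_placeholders_to_psycopg_py_alt (sql : String) : String :=
  String.mk (pvScan sql.toList)

-- ===== PRECONDITION & SPEC =====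
def Spec_sqlite_placeholders_to_psycopg_py (sql : String) (out : String) : Prop := out = sqlite_placeholders_to_psycopg_py_alt sql
instance (sql : String) (out : String) : Decidable (Spec_sqlite_placeholders_to_psycopg_py sql out) := by unfold Spec_sqlite_placeholders_to_psycopg_py; infer_instance

-- ===== CLAIM (what is proved, stated in full; the proofs are below) =====
def Claim_equal_sqlite_placeholders_to_psycopg_py : Prop := ∀ (sql : String), Dom_sqlite_placeholders_to_psycopg_py sql → Spec_sqlite_placeholders_to_psycopg_py sql (sqlite_placeholders_to_psycopg_py sql)

-- ===== LEMMAS AND PROOFS =====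

-- The three reachable states of A's machine correspond to B's three modes.
theorem pv_agree (n : Nat) : ∀ l : List Char, l.length ≤ n →
    pvScan l = pvALoop false false l ∧
    pvCopyLit '\'' l = pvALoop true false l ∧
    pvCopyLit '"' l = pvALoop false true l := by
  induction n with
  | zero =>
    intro l hl
    have : l = [] := List.length_eq_zero_iff.mp (Nat.le_zero.mp hl)
    subst this
    refine ⟨?_, ?_, ?_⟩ <;> simp [pvScan.eq_def, pvCopyLit.eq_def, pvALoop]
  | succ n ih =>
    intro l hl
    match l with
    | [] =>
      refine ⟨?_, ?_, ?_⟩ <;> simp [pvScan.eq_def, pvCopyLit.eq_def, pvALoop]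
    | c :: rest =>
      have hr : rest.length ≤ n := by simp at hl; omega
      obtain ⟨ihS, ihL1, ihL2⟩ := ih rest hr
      refine ⟨?_, ?_, ?_⟩
      · -- scan mode vs state (false,false)
        rw [pvScan.eq_def]
        by_cases h1 : c = '\''
        · subst h1; simp [pvALoop, ihL1]
        · by_cases h2 : c = '"'
          · subst h2; simp [pvALoop, ihL2]
          · by_cases h3 : c = '?'
            · subst h3; simp [pvALoop, ihS]
            · by_cases h4 : c = '%'
              · subst h4; simp [pvALoop, ihS]
              · simp [pvALoop, h1, h2, h3, h4, ihS]
      · -- single-quoted-literal mode vs state (true,false)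
        rw [pvCopyLit.eq_def]
        by_cases h1 : c = '\''
        · subst h1
          match rest with
          | [] => simp [pvALoop]
          | c2 :: rest2 =>
            by_cases h2 : c2 = '\''
            · subst h2
              have hr2 : rest2.length ≤ n := by simp at hl; omega
              obtain ⟨_, ihL1', _⟩ := ih rest2 hr2
              simp [pvALoop, ihL1']
            · simp [pvALoop, h2, ihS]
        · by_cases h4 : c = '%'
          · subst h4; simp [pvALoop, ihL1]
          · simp [pvALoop, h1, h4, ihL1]
      · -- double-quoted-literal mode vs state (false,true)
        rw [pvCopyLit.eq_def]
        by_cases h1 : c = '"'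
        · subst h1
          match rest with
          | [] => simp [pvALoop]
          | c2 :: rest2 =>
            by_cases h2 : c2 = '"'
            · subst h2
              have hr2 : rest2.length ≤ n := by simp at hl; omega
              obtain ⟨_, _, ihL2'⟩ := ih rest2 hr2
              simp [pvALoop, ihL2']
            · simp [pvALoop, h2, ihS]
        · by_cases h4 : c = '%'
          · subst h4; simp [pvALoop, ihL2]
          · simp [pvALoop, h1, h4, ihL2]

-- ===== VERDICT (by name: the statement is the Claim_ definition above) =====
theorem sqlite_placeholders_to_psycopg_py_spec : Claim_equal_sqlite_placeholders_to_psycopg_py := by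
  intro sql _
  unfold Spec_sqlite_placeholders_to_psycopg_py sqlite_placeholders_to_psycopg_py sqlite_placeholders_to_psycopg_py_alt
  rw [(pv_agree sql.toList.length sql.toList le_rfl).1]
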